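-- pv_equiv track=rewrite | github.com/sriram369/ewaste-policy-bot | brain.py | _is_policy_question
-- ===== SOURCE A (Python) =====
-- _POLICY_KEYWORDS = {
--     "hb", "sb", "bill", "section", "article", "law", "regulation", "require",
--     "mandate", "comply", "compliance", "epa", "nfpa", "dpw", "baltimore",
--     "battery", "lithium", "ewaste", "e-waste", "waste", "recycl", "producer",
--     "manufacturer", "register", "registration", "fee", "penalty", "deadline",
--     "october", "protocol", "universal", "hazard", "storage", "collection",
--     "takeback", "take-back", "dispose", "disposal", "handler", "facility",
-- }
--
-- def _is_policy_question(text: str) -> bool: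
--     """
--     Returns True if the message looks like a compliance/policy question.
--     Uses keyword matching — fast, no extra LLM call needed.
--     Short greetings and casual messages return False.
--     """
--     text_lower = text.lower()
--     words = text_lower.split()
--
--     # Very short messages are almost always casual
--     if len(words) <= 3:
--         return False
--
--     # Check for any policy-related keyword in the message
--     for keyword in _POLICY_KEYWORDS:
--         if keyword in text_lower:
--             return True
--
--     return False
-- ===== SOURCE B (Python) =====
-- # Keywords precompiled once into a first-letter index: one pass over the text,
-- # testing only the keywords whose first letter matches the current character.
-- _KW_PATTERN = ("hb|sb|bill|section|article|law|regulation|require|mandate|comply|"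
--                "compliance|epa|nfpa|dpw|baltimore|battery|lithium|ewaste|e-waste|"
--                "waste|recycl|producer|manufacturer|register|registration|fee|"
--                "penalty|deadline|october|protocol|universal|hazard|storage|"
--                "collection|takeback|take-back|dispose|disposal|handler|facility")
--
-- _BY_FIRST = {}
-- for _k in _KW_PATTERN.split("|"):
--     _BY_FIRST[_k[0]] = _BY_FIRST.get(_k[0], []) + [_k]
--
--
-- def _is_policy_question(text: str) -> bool:
--     t = text.lower()
--     if len(t.split()) <= 3:
--         return False
--     for i, c in enumerate(t):
--         for k in _BY_FIRST.get(c, []):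
--             if t.startswith(k, i):
--                 return True
--     return False
-- ===== Notes on version B (the rewrite author's own statement) =====
-- stated objective: alternative
-- what changed: Replaces A's per-keyword substring loop (one full scan of the text per keyword) with a single left-to-right position scan over the text, consulting a first-letter index (dict from first character to keywords) built once so only keywords starting with the current character are tested.
import Mathlib
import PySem

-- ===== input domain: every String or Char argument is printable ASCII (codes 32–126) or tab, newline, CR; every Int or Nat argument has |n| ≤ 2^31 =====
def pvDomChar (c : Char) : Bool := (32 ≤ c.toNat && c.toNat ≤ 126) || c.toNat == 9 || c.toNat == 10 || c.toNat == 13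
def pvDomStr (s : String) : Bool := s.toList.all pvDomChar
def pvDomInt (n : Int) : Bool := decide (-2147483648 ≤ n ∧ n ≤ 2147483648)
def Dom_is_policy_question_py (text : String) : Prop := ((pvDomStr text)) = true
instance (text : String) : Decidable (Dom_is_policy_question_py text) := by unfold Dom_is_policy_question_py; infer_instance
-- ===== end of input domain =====

-- B replaces A's per-keyword substring loop by a single position scan over the text,
-- using a first-letter index of the keywords built once (alternative data structure).

-- ===== PORT A =====
-- _POLICY_KEYWORDS as a list; the loop 'for keyword in …: if keyword in text_lower:
-- return True' is any() over it (order-independent, so set iteration order is immaterial)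
def policyKeywords : List String :=
  ["hb", "sb", "bill", "section", "article", "law", "regulation", "require",
   "mandate", "comply", "compliance", "epa", "nfpa", "dpw", "baltimore",
   "battery", "lithium", "ewaste", "e-waste", "waste", "recycl", "producer",
   "manufacturer", "register", "registration", "fee", "penalty", "deadline",
   "october", "protocol", "universal", "hazard", "storage", "collection",
   "takeback", "take-back", "dispose", "disposal", "handler", "facility"]

def is_policy_question_py (text : String) : Bool :=
  let text_lower := PySem.Str.lower text
  let words := PySem.Str.split₀ text_lower
  if words.length ≤ 3 then false
  else policyKeywords.any (fun keyword => PySem.Str.isIn keyword text_lower)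

-- ===== PORT B =====
-- Source B's _KW_PATTERN, split once on '|'
def kwPattern : String :=
  "hb|sb|bill|section|article|law|regulation|require|mandate|comply|compliance|epa|nfpa|dpw|baltimore|battery|lithium|ewaste|e-waste|waste|recycl|producer|manufacturer|register|registration|fee|penalty|deadline|october|protocol|universal|hazard|storage|collection|takeback|take-back|dispose|disposal|handler|facility"

def kwList : List (List Char) := PySem.Chars.splitOn kwPattern.toList "|".toList

def kwPairs : List (Char × List Char) :=
  kwList.map (fun k => (k.headD ' ', k))

-- Source B's _BY_FIRST: dict from first letter to the keywords starting with it
def byFirst : PySem.Dict Char (List (List Char)) :=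
  kwPairs.foldl (fun d p => d.modify p.1 [] (· ++ [p.2])) PySem.Dict.empty

-- Source B's 'for i, c in enumerate(t): for k in _BY_FIRST.get(c, []): if t.startswith(k, i)':
-- structural recursion over the suffixes, testing only the current character's bucket
def bScan (d : PySem.Dict Char (List (List Char))) : List Char → Bool
  | [] => false
  | c :: rest => (d.getD c []).any (fun k => k.isPrefixOf (c :: rest)) || bScan d rest

def is_policy_question_py_alt (text : String) : Bool :=
  let t := PySem.Str.lower text
  if (PySem.Str.split₀ t).length ≤ 3 then false
  else bScan byFirst t.toList

-- ===== PRECONDITION & SPEC =====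
def Spec_is_policy_question_py (text : String) (out : Bool) : Prop := out = is_policy_question_py_alt text
instance (text : String) (out : Bool) : Decidable (Spec_is_policy_question_py text out) := by unfold Spec_is_policy_question_py; infer_instance

-- ===== CLAIM (what is proved, stated in full; the proofs are below) =====
def Claim_equal_is_policy_question_py : Prop := ∀ (text : String), Dom_is_policy_question_py text → Spec_is_policy_question_py text (is_policy_question_py text)

-- ===== LEMMAS AND PROOFS =====

-- the bucket of c holds exactly the keywords whose first character is c
set_option maxRecDepth 8192 in
theorem mem_byFirst_getD (c : Char) (k : List Char) :
    k ∈ byFirst.getD c [] ↔ k ∈ policyKeywords.map String.toList ∧ k.headD ' ' = c := by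
  have h : byFirst.getD c [] = (kwPairs.filter (fun p => p.1 == c)).map (·.2) := by
    simpa using PySem.Dict.getD_foldl_modify_append kwPairs PySem.Dict.empty c
  have hpairs : kwPairs = (policyKeywords.map String.toList).map (fun k => (k.headD ' ', k)) := by
    have : kwList = policyKeywords.map String.toList := by rfl
    rw [kwPairs, this]
  rw [h, hpairs]
  simp only [List.mem_map, List.mem_filter]
  constructor
  · rintro ⟨p, ⟨hp, hc⟩, rfl⟩
    obtain ⟨w, hw, rfl⟩ := hp
    exact ⟨hw, by simpa using hc⟩
  · rintro ⟨hk, hc⟩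
    exact ⟨(k.headD ' ', k), ⟨⟨k, hk, rfl⟩, by simpa using hc⟩, rfl⟩

-- every keyword is nonempty
theorem policyKeywords_ne_nil : ∀ k ∈ policyKeywords.map String.toList, k ≠ [] := by decide

-- B's bucketed position scan finds exactly the keywords prefixing some suffix
theorem bScan_iff (cs : List Char) :
    bScan byFirst cs = true ↔
      ∃ k ∈ policyKeywords.map String.toList, ∃ j, k <+: cs.drop j := by
  induction cs with
  | nil =>
    simp only [bScan]
    constructor
    · intro h; exact absurd h (by simp)
    · rintro ⟨k, hk, j, hp⟩
      exact absurd (List.prefix_nil.1 (by simpa using hp)) (policyKeywords_ne_nil k hk)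
  | cons c rest ih =>
    simp only [bScan, Bool.or_eq_true, List.any_eq_true, ih]
    constructor
    · rintro (⟨k, hk, hp⟩ | ⟨k, hk, j, hp⟩)
      · exact ⟨k, ((mem_byFirst_getD c k).1 hk).1, 0, by simpa using hp⟩
      · exact ⟨k, hk, j + 1, by simpa using hp⟩
    · rintro ⟨k, hk, j, hp⟩
      cases j with
      | zero =>
        left
        refine ⟨k, (mem_byFirst_getD c k).2 ⟨hk, ?_⟩, by simpa using hp⟩
        obtain ⟨x, xs, rfl⟩ := List.exists_cons_of_ne_nil (policyKeywords_ne_nil k hk)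
        simp only [List.drop_zero] at hp
        obtain ⟨t, ht⟩ := hp
        simp only [List.cons_append, List.cons.injEq] at ht
        simp [ht.1]
      | succ j => exact Or.inr ⟨k, hk, j, by simpa using hp⟩

-- A's per-keyword substring test equals B's bucketed position scan
theorem any_isIn_eq_bScan (s : String) :
    (policyKeywords.any fun k => PySem.Str.isIn k s) = bScan byFirst s.toList := by
  rw [Bool.eq_iff_iff, bScan_iff]
  simp only [List.any_eq_true, List.mem_map]
  constructor
  · rintro ⟨k, hk, hin⟩
    refine ⟨k.toList, ⟨k, hk, rfl⟩, ?_⟩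
    rw [PySem.Str.isIn_iff_infix] at hin
    exact (PySem.Chars.exists_prefix_drop_iff_isIn _ _).2 (by rwa [PySem.Chars.isIn_iff_infix])
  · rintro ⟨_, ⟨k, hk, rfl⟩, j, hp⟩
    refine ⟨k, hk, ?_⟩
    rw [PySem.Str.isIn_iff_infix, ← PySem.Chars.isIn_iff_infix]
    exact (PySem.Chars.exists_prefix_drop_iff_isIn _ _).1 ⟨j, hp⟩

-- ===== VERDICT (by name: the statement is the Claim_ definition above) =====
theorem is_policy_question_py_spec : Claim_equal_is_policy_question_py := by
  intro text _
  unfold Spec_is_policy_question_py is_policy_question_py is_policy_question_py_alt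
  simp only []
  split_ifs with h
  · rfl
  · exact any_isIn_eq_bScan (PySem.Str.lower text)
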